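-- pv_equiv track=rewrite | github.com/chxchxkkk/Zappy | ai_src/Player/behaviour/Behaviour.py | find_vector_to_tile
-- ===== SOURCE A (Python) =====
-- def find_vector_to_tile(tile_id):
--     i = 0
--     for y in range(0, 8):
--         for x in range(-y, y + 1):
--             if i == tile_id:
--                 return y, x
--             i += 1
--     raise
-- ===== SOURCE B (Python) =====
-- def find_vector_to_tile(tile_id):
--     if 0 <= tile_id <= 63:
--         y = 0
--         while (y + 1) * (y + 1) <= tile_id:
--             y += 1
--         return y, tile_id - y * y - y
--     raise
-- ===== Notes on version B (the rewrite author's own statement) =====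
-- stated objective: simpler
-- what changed: Replaces the 64-step nested scan with arithmetic: y = floor(sqrt(tile_id)) found by an at-most-8-step square search, x = tile_id - y*y - y.
import Mathlib
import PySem

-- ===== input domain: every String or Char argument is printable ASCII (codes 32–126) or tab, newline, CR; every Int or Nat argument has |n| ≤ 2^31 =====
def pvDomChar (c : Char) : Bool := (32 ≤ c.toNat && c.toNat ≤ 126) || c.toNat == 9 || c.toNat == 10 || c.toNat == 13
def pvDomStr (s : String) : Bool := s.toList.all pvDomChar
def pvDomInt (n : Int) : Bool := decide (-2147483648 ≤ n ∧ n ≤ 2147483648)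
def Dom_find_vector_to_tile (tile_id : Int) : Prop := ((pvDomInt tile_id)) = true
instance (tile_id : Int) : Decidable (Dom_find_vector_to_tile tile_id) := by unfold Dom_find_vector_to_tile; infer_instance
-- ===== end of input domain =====

-- B replaces A's 64-step nested scan by arithmetic (y = floor sqrt via an ≤8-step search,
-- x = tile_id - y² - y); objective: simpler. Both raise on tile_id outside 0..63 (excluded by Pre_).

-- ===== PORT A =====
-- A scans y = 0..7, x = -y..y with a running counter i; returns (y,x) when i == tile_id,
-- else falls off the loops and raises (Pre_ excludes that; the port returns (0,0) there).
def find_vector_to_tile (tile_id : Int) : Int × Int :=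
  let st := (PySem.List.pyRange 0 8 1).foldl (fun (acc : Option (Int × Int) × Int) y =>
      (PySem.List.pyRange (-y) (y + 1) 1).foldl (fun (acc2 : Option (Int × Int) × Int) x =>
        match acc2 with
        | (some r, i) => (some r, i)
        | (none, i) => if i == tile_id then (some (y, x), i) else (none, i + 1)) acc)
    (none, 0)
  match st with
  | (some r, _) => r
  | (none, _) => (0, 0)   -- Python raises here; excluded by Pre_

-- ===== PORT B =====
-- while (y+1)*(y+1) <= tile_id: y += 1   (fuel 8 only bounds the loop; under Pre_ y stays < 8)
def pvFindY (tile_id y : Int) : Nat → Int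
  | 0 => y
  | n + 1 => if (y + 1) * (y + 1) ≤ tile_id then pvFindY tile_id (y + 1) n else y

def find_vector_to_tile_alt (tile_id : Int) : Int × Int :=
  if 0 ≤ tile_id ∧ tile_id ≤ 63 then
    let y := pvFindY tile_id 0 8
    (y, tile_id - y * y - y)
  else (0, 0)   -- Python raises here; excluded by Pre_

-- ===== PRECONDITION & SPEC =====
-- Pre_: exactly the inputs on which A returns (both programs raise RuntimeError otherwise).
def Pre_find_vector_to_tile (tile_id : Int) : Prop := 0 ≤ tile_id ∧ tile_id ≤ 63
instance (tile_id : Int) : Decidable (Pre_find_vector_to_tile tile_id) := by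
  unfold Pre_find_vector_to_tile; infer_instance
def pvWitness_find_vector_to_tile : Int := (5)
def Spec_find_vector_to_tile (tile_id : Int) (out : Int × Int) : Prop := out = find_vector_to_tile_alt tile_id
instance (tile_id : Int) (out : Int × Int) : Decidable (Spec_find_vector_to_tile tile_id out) := by
  unfold Spec_find_vector_to_tile; infer_instance

-- ===== CLAIM (what is proved, stated in full; the proofs are below) =====
def Claim_equal_find_vector_to_tile : Prop := ∀ (tile_id : Int), Dom_find_vector_to_tile tile_id → Pre_find_vector_to_tile tile_id → Spec_find_vector_to_tile tile_id (find_vector_to_tile tile_id)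

-- ===== LEMMAS AND PROOFS =====

-- ===== VERDICT (by name: the statement is the Claim_ definition above) =====
theorem find_vector_to_tile_spec : Claim_equal_find_vector_to_tile := by
  intro tile_id _ hpre
  unfold Spec_find_vector_to_tile
  obtain ⟨h0, h63⟩ := hpre
  interval_cases tile_id <;> decide
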